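-- pv_equiv track=rewrite | github.com/Praveenias/learninghcpython | python/practise/walmart/p2.py | count_subarrays_with_max_greater_than_k
-- ===== SOURCE A (Python) =====
-- def count_subarrays_with_max_greater_than_k(n, k, arr):
--     count = 0
--     current_length = 0
--
--     for i in range(n):
--         if arr[i] > k:
--             # Extend the subarray
--             current_length += 1
--             count += current_length
--         else:
--             # Reset subarray count
--             current_length = 0
--
--     return count
-- ===== SOURCE B (Python) =====
-- def count_subarrays_with_max_greater_than_k(n, k, arr):
--     # Staged boundary method: collect the indices of the "blocking" elements
--     # (<= k) in the first n elements, then count subarrays between consecutive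
--     # blockers with the triangular closed form -- no running accumulator.
--     m = n if n > 0 else 0
--     prefix = arr[:m]
--     bad = [i for i, x in enumerate(prefix) if x <= k]
--     bounds = [-1] + bad + [len(prefix)]
--     return sum((b - a - 1) * (b - a) // 2 for a, b in zip(bounds, bounds[1:]))
-- ===== Notes on version B (the rewrite author's own statement) =====
-- stated objective: alternative
-- what changed: B has no running accumulator: it first materialises the list of blocking indices (elements <= k) in the prefix, then sums the triangular closed form over gaps between consecutive boundary indices.
import Mathlib
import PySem

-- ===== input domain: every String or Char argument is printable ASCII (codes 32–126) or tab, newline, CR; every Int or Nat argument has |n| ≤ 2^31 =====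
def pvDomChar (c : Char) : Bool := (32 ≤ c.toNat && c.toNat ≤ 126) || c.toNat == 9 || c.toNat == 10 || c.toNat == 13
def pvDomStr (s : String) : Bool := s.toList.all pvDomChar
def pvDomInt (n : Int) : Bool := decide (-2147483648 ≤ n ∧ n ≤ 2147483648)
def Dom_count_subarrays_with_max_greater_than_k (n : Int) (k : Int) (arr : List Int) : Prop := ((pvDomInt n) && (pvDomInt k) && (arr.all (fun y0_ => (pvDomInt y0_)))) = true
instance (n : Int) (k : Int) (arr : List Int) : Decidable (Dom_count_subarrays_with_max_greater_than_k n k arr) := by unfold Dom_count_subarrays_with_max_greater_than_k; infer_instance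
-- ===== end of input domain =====

-- ===== PORT A =====
-- A: for i in range(n): extend/reset a running length, adding it to the count each step.
-- arr[i] ported as pyGetD (default 0): the IndexError case n > len(arr) is excluded by Pre_.
def count_subarrays_with_max_greater_than_k (n : Int) (k : Int) (arr : List Int) : Int :=
  ((PySem.List.pyRange 0 n 1).foldl
    (fun (st : Int × Int) i =>
      if PySem.List.pyGetD arr i 0 > k then (st.1 + (st.2 + 1), st.2 + 1) else (st.1, 0))
    (0, 0)).1

-- ===== PORT B =====
-- B (Source B): collect the indices of blocking elements (<= k) in the prefix, bracket them
-- with -1 and len(prefix), and sum the triangular closed form over consecutive gaps.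
-- arr[:m] with m >= 0 is exactly List.take; enumerate is PySem.List.enumerate.
def count_subarrays_with_max_greater_than_k_alt (n : Int) (k : Int) (arr : List Int) : Int :=
  let m : Int := if n > 0 then n else 0
  let pre := arr.take m.toNat
  let bad := ((PySem.List.enumerate pre 0).filter (fun p => p.2 ≤ k)).map (fun p => p.1)
  let bounds := -1 :: (bad ++ [(pre.length : Int)])
  ((bounds.zip bounds.tail).map
    (fun p => PySem.Int.floordiv ((p.2 - p.1 - 1) * (p.2 - p.1)) 2)).sum

-- ===== PRECONDITION & SPEC =====
-- Pre_ excludes exactly the inputs where A raises IndexError (some i in range(n) with i >= len(arr)).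
def Pre_count_subarrays_with_max_greater_than_k (n : Int) (k : Int) (arr : List Int) : Prop :=
  n <= (arr.length : Int)
instance (n : Int) (k : Int) (arr : List Int) : Decidable (Pre_count_subarrays_with_max_greater_than_k n k arr) := by unfold Pre_count_subarrays_with_max_greater_than_k; infer_instance

def pvWitness_count_subarrays_with_max_greater_than_k : Int × Int × List Int := (3, 1, [2, 0, 5])

def Spec_count_subarrays_with_max_greater_than_k (n : Int) (k : Int) (arr : List Int) (out : Int) : Prop := out = count_subarrays_with_max_greater_than_k_alt n k arr
instance (n : Int) (k : Int) (arr : List Int) (out : Int) : Decidable (Spec_count_subarrays_with_max_greater_than_k n k arr out) := by unfold Spec_count_subarrays_with_max_greater_than_k; infer_instance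

-- ===== CLAIM (what is proved, stated in full; the proofs are below) =====
def Claim_equal_count_subarrays_with_max_greater_than_k : Prop := ∀ (n : Int) (k : Int) (arr : List Int), Dom_count_subarrays_with_max_greater_than_k n k arr → Pre_count_subarrays_with_max_greater_than_k n k arr → Spec_count_subarrays_with_max_greater_than_k n k arr (count_subarrays_with_max_greater_than_k n k arr)

-- ===== LEMMAS AND PROOFS =====

-- Proof-only middle form: run-by-run triangular scan; both ports are reduced to it.
def pvRunScan (k : Int) : List Int -> Int -> Int
  | [], run => run * (run + 1) / 2
  | x :: xs, run =>
    if x > k then pvRunScan k xs (run + 1)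
    else run * (run + 1) / 2 + pvRunScan k xs 0

-- A's loop body, restructured as a recursion over the prefix list itself.
def pvLoopA (k : Int) : List Int -> Int × Int -> Int × Int
  | [], st => st
  | x :: xs, st =>
    pvLoopA k xs (if x > k then (st.1 + (st.2 + 1), st.2 + 1) else (st.1, 0))

theorem pvLoopA_eq_foldl (k : Int) (l : List Int) (st : Int × Int) :
    pvLoopA k l st =
      l.foldl (fun (st : Int × Int) x =>
        if x > k then (st.1 + (st.2 + 1), st.2 + 1) else (st.1, 0)) st := by
  induction l generalizing st with
  | nil => rfl
  | cons x xs ih => simp [pvLoopA, ih]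

theorem pvTri_succ (r : Int) : (r + 1) * (r + 1 + 1) / 2 = r * (r + 1) / 2 + (r + 1) := by
  have h : (r + 1) * (r + 1 + 1) = r * (r + 1) + 2 * (r + 1) := by ring
  have he : (r * (r + 1)) % 2 = 0 := Int.even_iff.mp (Int.even_mul_succ_self r)
  generalize hb : (r + 1) * (r + 1 + 1) = b at h
  generalize ha : r * (r + 1) = a at h he
  omega

-- Main invariant for A: with current run length r, A's count c is r's pending triangular
-- number short of what the run scan will deliver.
theorem pvLoopA_fst (k : Int) (l : List Int) (c r : Int) :
    (pvLoopA k l (c, r)).1 = c - r * (r + 1) / 2 + pvRunScan k l r := by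
  induction l generalizing c r with
  | nil => simp [pvLoopA, pvRunScan]
  | cons x xs ih =>
    by_cases hx : x > k
    · simp only [pvLoopA, if_pos hx, pvRunScan]
      rw [ih (c + (r + 1)) (r + 1)]
      have ht := pvTri_succ r
      omega
    · simp only [pvLoopA, if_neg hx, pvRunScan]
      rw [ih c 0]
      omega

-- B-side helpers for the proof: the blocking-index list with an explicit offset.
def pvBadIdx (k : Int) (o : Int) : List Int → List Int
  | [] => []
  | x :: xs => if x ≤ k then o :: pvBadIdx k (o + 1) xs else pvBadIdx k (o + 1) xs

theorem pvBad_eq (k o : Int) (l : List Int) :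
    ((PySem.List.enumerate l o).filter (fun p => p.2 ≤ k)).map (fun p => p.1)
      = pvBadIdx k o l := by
  induction l generalizing o with
  | nil => simp [PySem.List.enumerate_nil, pvBadIdx]
  | cons x xs ih =>
    by_cases hx : x ≤ k <;>
      simp [PySem.List.enumerate_cons, pvBadIdx, hx, ih]

-- The zip-of-adjacent sum as a structural recursion.
def pvGapSum : List Int → Int
  | a :: b :: rest =>
      PySem.Int.floordiv ((b - a - 1) * (b - a)) 2 + pvGapSum (b :: rest)
  | _ => 0

theorem pvGapSum_eq_zipSum (l : List Int) :
    ((l.zip l.tail).map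
      (fun p => PySem.Int.floordiv ((p.2 - p.1 - 1) * (p.2 - p.1)) 2)).sum = pvGapSum l := by
  match l with
  | [] => rfl
  | [a] => rfl
  | a :: b :: rest =>
    simp only [List.tail_cons, List.zip_cons_cons, List.map_cons, List.sum_cons, pvGapSum]
    rw [← pvGapSum_eq_zipSum (b :: rest)]
    simp

theorem pvFd2 (a : Int) : PySem.Int.floordiv a 2 = a / 2 :=
  PySem.Int.floordiv_eq_ediv_of_pos (by omega)

-- Main invariant for B: the gap sum over boundaries p, the blockers of l at offset o,
-- and the right end o + |l| is the run scan of l entered with run length o - p - 1.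
theorem pvGapSum_bad (k : Int) (l : List Int) (p o : Int) (hpo : p < o) :
    pvGapSum (p :: (pvBadIdx k o l ++ [o + (l.length : Int)]))
      = pvRunScan k l (o - p - 1) := by
  induction l generalizing p o with
  | nil =>
    simp only [pvBadIdx, List.nil_append, List.length_nil, Int.natCast_zero, add_zero,
      pvGapSum, pvRunScan]
    have e : (o - p - 1) * (o - p - 1 + 1) = (o - p - 1) * (o - p) := by ring
    rw [e, pvFd2]
  | cons x xs ih =>
    have hlen : o + ((x :: xs).length : Int) = (o + 1) + (xs.length : Int) := by
      simp [List.length_cons]; ring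
    by_cases hx : x ≤ k
    · simp only [pvBadIdx, if_pos hx, List.cons_append, pvGapSum, pvRunScan,
        if_neg (by omega : ¬ x > k)]
      rw [hlen, ih o (o + 1) (by omega)]
      have e : (o - p - 1) * (o - p - 1 + 1) = (o - p - 1) * (o - p) := by ring
      rw [e, pvFd2]
      simp
    · simp only [pvBadIdx, if_neg hx, pvRunScan, if_pos (by omega : x > k)]
      rw [hlen, ih p (o + 1) (by omega)]
      congr 1
      omega

-- ===== VERDICT (by name: the statement is the Claim_ definition above) =====
theorem count_subarrays_with_max_greater_than_k_spec : Claim_equal_count_subarrays_with_max_greater_than_k := by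
  intro n k arr _ hpre
  unfold Spec_count_subarrays_with_max_greater_than_k
  unfold count_subarrays_with_max_greater_than_k count_subarrays_with_max_greater_than_k_alt
  unfold Pre_count_subarrays_with_max_greater_than_k at hpre
  simp only
  -- reduce B to the run scan of the prefix
  rw [pvGapSum_eq_zipSum, pvBad_eq]
  set m : Int := if n > 0 then n else 0 with hm
  set l := arr.take m.toNat with hl
  have haltB : pvGapSum (-1 :: (pvBadIdx k 0 l ++ [(l.length : Int)]))
      = pvRunScan k l 0 := by
    have := pvGapSum_bad k l (-1) 0 (by omega)
    simpa using this
  rw [haltB]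
  by_cases hn : 0 ≤ n
  · have hmn : m.toNat = n.toNat := by
      rw [hm]; split_ifs with h <;> omega
    have hlen : ((l.length : Int)) = n := by
      rw [hl, hmn]; simp [List.length_take]; omega
    have hstep : (PySem.List.pyRange 0 n 1).foldl
        (fun (st : Int × Int) i =>
          if PySem.List.pyGetD arr i 0 > k then (st.1 + (st.2 + 1), st.2 + 1) else (st.1, 0)) (0, 0)
      = (PySem.List.pyRange 0 n 1).foldl
        (fun (st : Int × Int) i =>
          if PySem.List.pyGetD l i 0 > k then (st.1 + (st.2 + 1), st.2 + 1) else (st.1, 0)) (0, 0) := by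
      apply PySem.List.foldl_congr_mem
      intro acc x hx
      have hxm := PySem.List.mem_pyRange_one.mp hx
      have h1 : PySem.List.pyGetD arr x 0 = arr[x.toNat]'(by omega) :=
        PySem.List.pyGetD_eq_getElem arr 0 hxm.1 (by omega)
      have h2 : PySem.List.pyGetD l x 0 = l[x.toNat]'(by
          have : (l.length : Int) = n := hlen
          omega) :=
        PySem.List.pyGetD_eq_getElem _ 0 hxm.1 (by rw [hlen]; omega)
      rw [h1, h2]
      simp [hl, hmn, List.getElem_take]
    rw [hstep, ← hlen,
      PySem.List.foldl_pyRange_zero_pyGetD' l 0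
        (fun (st : Int × Int) (v : Int) =>
          if v > k then (st.1 + (st.2 + 1), st.2 + 1) else (st.1, 0)) ((0 : Int), (0 : Int)),
      ← pvLoopA_eq_foldl]
    have h := pvLoopA_fst k l 0 0
    simpa using h
  · have hl0 : l = [] := by
      rw [hl, hm]; split_ifs with h
      · omega
      · simp
    rw [PySem.List.pyRange_one_eq_nil (by omega), hl0]
    simp [pvRunScan]
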